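-- pv_equiv track=rewrite | github.com/trytodupe/nonebot-plugin-moellmchats | nonebot_plugin_moellmchats/response_utils.py | replace_image_placeholders
-- ===== SOURCE A (Python) =====
-- def replace_image_placeholders(
--     text: str, replacements: list[str], placeholder: str = "[图片]"
-- ) -> str:
--     if placeholder not in text:
--         if replacements:
--             return f"{text}\n" + "\n".join(replacements)
--         return text
--
--     parts = text.split(placeholder)
--     result = [parts[0]]
--     for index, replacement in enumerate(replacements):
--         result.append(replacement)
--         if index + 1 < len(parts):
--             result.append(parts[index + 1])
--
--     if len(replacements) + 1 < len(parts):
--         result.extend(parts[len(replacements) + 1 :])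
--     return "".join(result)
-- ===== SOURCE B (Python) =====
-- def replace_image_placeholders(
--     text: str, replacements: list[str], placeholder: str = "[图片]"
-- ) -> str:
--     if placeholder not in text:
--         if replacements:
--             return f"{text}\n" + "\n".join(replacements)
--         return text
--
--     out = []
--     pos = 0
--     ri = 0
--     while True:
--         idx = text.find(placeholder, pos)
--         if idx == -1:
--             out.append(text[pos:])
--             break
--         out.append(text[pos:idx])
--         if ri < len(replacements):
--             out.append(replacements[ri])
--             ri += 1
--         pos = idx + len(placeholder)
--     out.append("".join(replacements[ri:]))
--     return "".join(out)
-- ===== Notes on version B (the rewrite author's own statement) =====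
-- stated objective: alternative
-- what changed: A splits the text into a parts list and interleaves it with the replacements by index; B makes a single cursor scan with str.find, emitting text segments and consuming replacements as it goes, then flushes the unused replacements.
-- outside the precondition, e.g. on replace_image_placeholders('ab', ['x'], ''): A raises ValueError, B does not finish within the time limit
import Mathlib
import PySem

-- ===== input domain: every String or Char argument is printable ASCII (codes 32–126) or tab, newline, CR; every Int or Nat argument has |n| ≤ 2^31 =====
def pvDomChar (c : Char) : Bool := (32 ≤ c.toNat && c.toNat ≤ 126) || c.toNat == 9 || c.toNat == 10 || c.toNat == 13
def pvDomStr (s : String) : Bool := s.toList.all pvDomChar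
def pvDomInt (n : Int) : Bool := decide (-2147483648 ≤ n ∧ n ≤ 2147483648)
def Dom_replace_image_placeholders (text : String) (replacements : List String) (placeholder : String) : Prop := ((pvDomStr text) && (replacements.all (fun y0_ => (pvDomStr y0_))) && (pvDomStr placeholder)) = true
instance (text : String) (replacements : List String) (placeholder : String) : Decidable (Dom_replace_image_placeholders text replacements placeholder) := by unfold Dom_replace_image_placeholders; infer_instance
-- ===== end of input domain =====

-- B replaces A's split-into-parts-and-index-interleave by a single cursor scan (find / advance) that
-- consumes the replacement list as it goes; objective: alternative decomposition, same asymptotic cost.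

-- ===== PORT A =====
def replace_image_placeholders (text : String) (replacements : List String) (placeholder : String) : String :=
  if PySem.Chars.isIn placeholder.toList text.toList = false then
    if replacements ≠ [] then
      String.ofList (text.toList ++ '\n' :: PySem.Chars.join ['\n'] (replacements.map String.toList))
    else text
  else
    match PySem.Chars.split? text.toList placeholder.toList with
    | none => text  -- text.split("") raises ValueError in Python; excluded by Pre_
    | some parts =>
      let reps := replacements.map String.toList
      let result := [PySem.List.pyGetD parts 0 []]
      let result := (PySem.List.enumerate reps).foldl
        (fun res p =>
          let res := res ++ [p.2]
          if p.1 + 1 < PySem.List.len parts then res ++ [PySem.List.pyGetD parts (p.1 + 1) []]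
          else res)
        result
      let result := if PySem.List.len reps + 1 < PySem.List.len parts then
          result ++ PySem.List.slice parts (some (PySem.List.len reps + 1)) none
        else result
      String.ofList (PySem.Chars.join [] result)

-- ===== PORT B =====
-- Source B's while-loop: the cursor `pos` is carried as the remaining suffix `rest`,
-- the replacement index `ri` as the remaining suffix `reps` of the replacement list.
def pvScanB (ph : List Char) (reps : List (List Char)) (rest : List Char) : List Char :=
  let idx := PySem.Chars.find rest ph
  if idx = -1 then rest ++ PySem.Chars.join [] reps
  else
    let tl := rest.drop (idx.toNat + ph.length)
    if h : tl.length < rest.length then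
      rest.take idx.toNat ++
        (match reps with
         | [] => pvScanB ph [] tl
         | r :: rs => r ++ pvScanB ph rs tl)
    else rest  -- unreachable when ph ≠ [] (Python's loop would never terminate for placeholder = "")
termination_by rest.length
decreasing_by
  · exact h
  · exact h

def replace_image_placeholders_alt (text : String) (replacements : List String) (placeholder : String) : String :=
  if PySem.Chars.isIn placeholder.toList text.toList = false then
    if replacements ≠ [] then
      String.ofList (text.toList ++ '\n' :: PySem.Chars.join ['\n'] (replacements.map String.toList))
    else text
  else
    String.ofList (pvScanB placeholder.toList (replacements.map String.toList) text.toList)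

-- ===== PRECONDITION & SPEC =====
-- Pre_ excludes only placeholder = "": there '"" in text' is True and text.split("") raises ValueError in A.
def Pre_replace_image_placeholders (text : String) (replacements : List String) (placeholder : String) : Prop := placeholder ≠ ""
instance (text : String) (replacements : List String) (placeholder : String) : Decidable (Pre_replace_image_placeholders text replacements placeholder) := by unfold Pre_replace_image_placeholders; infer_instance
def pvWitness_replace_image_placeholders : String × List String × String := ("a[p]b[p]c[p]", ["X", "Y"], "[p]")

def Spec_replace_image_placeholders (text : String) (replacements : List String) (placeholder : String) (out : String) : Prop := out = replace_image_placeholders_alt text replacements placeholder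
instance (text : String) (replacements : List String) (placeholder : String) (out : String) : Decidable (Spec_replace_image_placeholders text replacements placeholder out) := by unfold Spec_replace_image_placeholders; infer_instance

-- ===== CLAIM (what is proved, stated in full; the proofs are below) =====
def Claim_equal_replace_image_placeholders : Prop := ∀ (text : String) (replacements : List String) (placeholder : String), Dom_replace_image_placeholders text replacements placeholder → Pre_replace_image_placeholders text replacements placeholder → Spec_replace_image_placeholders text replacements placeholder (replace_image_placeholders text replacements placeholder)

-- ===== LEMMAS AND PROOFS =====

-- clean structural version of PySem.Chars.splitOn (accumulator-free)
def pvSp (sep : List Char) : List Char → List (List Char)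
  | [] => [[]]
  | c :: rest =>
    if h : sep.isPrefixOf (c :: rest) ∧ sep ≠ [] then
      [] :: pvSp sep (List.drop sep.length (c :: rest))
    else
      match pvSp sep rest with
      | [] => [[c]]
      | p :: ps => (c :: p) :: ps
termination_by l => l.length
decreasing_by
  · have : 1 ≤ sep.length := by
      cases sep with
      | nil => exact absurd rfl h.2
      | cons a t => simp
    simp [List.length_drop]; omega
  · simp

theorem pvSp_ne_nil (sep l : List Char) : pvSp sep l ≠ [] := by
  cases l with
  | nil => rw [pvSp]; simp
  | cons c rest =>
    rw [pvSp]
    split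
    · simp
    · split <;> simp

-- A's interleaving loop, recursively: one replacement, then one part (if any), per step
def pvInterA : List (List Char) → List (List Char) → List (List Char)
  | _, [] => []
  | [], r :: rs => r :: pvInterA [] rs
  | p :: pt, r :: rs => r :: p :: pvInterA pt rs

-- B's interleaving: parts/replacements flattened, surplus replacements concatenated at the end
def pvIleave : List (List Char) → List (List Char) → List Char
  | ps, [] => PySem.Chars.join [] ps
  | [], r :: rs => r ++ pvIleave [] rs
  | p :: pt, r :: rs => r ++ (p ++ pvIleave pt rs)

theorem pvJoin_nil_cons (a : List Char) (l : List (List Char)) :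
    PySem.Chars.join [] (a :: l) = a ++ PySem.Chars.join [] l := by
  cases l with
  | nil => simp [PySem.Chars.join_singleton, PySem.Chars.join_nil]
  | cons b t => simp [PySem.Chars.join_cons_cons]

theorem pvIleave_nil (reps : List (List Char)) :
    pvIleave [] reps = PySem.Chars.join [] reps := by
  induction reps with
  | nil => rfl
  | cons r rs ih => rw [pvIleave, ih, pvJoin_nil_cons]

theorem pvGo_eq (sep : List Char) (hsep : sep ≠ []) :
    ∀ (fuel : Nat) (l cur : List Char) (acc : List (List Char)), l.length ≤ fuel →
      PySem.Chars.splitOn.go sep fuel l cur acc =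
        acc.reverse ++ (cur.reverse ++ (pvSp sep l).headI) :: (pvSp sep l).tail := by
  intro fuel
  induction fuel with
  | zero =>
    intro l cur acc hl
    have hln : l = [] := by cases l <;> simp_all
    subst hln
    rw [PySem.Chars.splitOn.go, pvSp]
    simp
  | succ n ih =>
    intro l cur acc hl
    cases l with
    | nil =>
      rw [PySem.Chars.splitOn.go, pvSp]
      all_goals simp
    | cons c rest =>
      rw [PySem.Chars.splitOn.go]
      by_cases hp : sep.isPrefixOf (c :: rest)
      · rw [if_pos hp]
        rw [ih (List.drop sep.length (c :: rest)) [] (cur.reverse :: acc)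
            (by
              have hsl : 0 < sep.length := List.length_pos_of_ne_nil hsep
              simp at hl ⊢
              omega)]
        rw [pvSp, dif_pos ⟨hp, hsep⟩]
        rcases h : pvSp sep (List.drop sep.length (c :: rest)) with _ | ⟨p, ps⟩
        · exact absurd h (pvSp_ne_nil _ _)
        · simp
      · rw [if_neg hp]
        rw [ih rest (c :: cur) acc (by simp at hl ⊢; omega)]
        rw [pvSp, dif_neg (by tauto)]
        rcases h : pvSp sep rest with _ | ⟨p, ps⟩
        · exact absurd h (pvSp_ne_nil _ _)
        · simp

theorem pvSplitOn_eq_pvSp (s sep : List Char) (hsep : sep ≠ []) :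
    PySem.Chars.splitOn s sep = pvSp sep s := by
  unfold PySem.Chars.splitOn
  rw [pvGo_eq sep hsep (s.length + 1) s [] [] (by omega)]
  rcases h : pvSp sep s with _ | ⟨p, ps⟩
  · exact absurd h (pvSp_ne_nil sep s)
  · simp

theorem pvFind_eq_of (s sub : List Char) (n : Nat) (h1 : sub <+: List.drop n s)
    (h2 : ∀ i < n, ¬ sub <+: List.drop i s) : PySem.Chars.find s sub = n := by
  have hinf : sub <:+: s := h1.isInfix.trans (List.drop_suffix n s).isInfix
  have h0 : 0 ≤ PySem.Chars.find s sub := (PySem.Chars.find_nonneg_iff s sub).mpr hinf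
  obtain ⟨hp, hmin⟩ := PySem.Chars.find_spec h0
  rcases lt_trichotomy (PySem.Chars.find s sub).toNat n with h | h | h
  · exact absurd hp (h2 _ h)
  · omega
  · exact absurd h1 (hmin n h)

theorem pvSp_find_eq (sep : List Char) (hsep : sep ≠ []) (s : List Char) :
    pvSp sep s =
      if PySem.Chars.find s sep = -1 then [s]
      else List.take (PySem.Chars.find s sep).toNat s ::
        pvSp sep (List.drop ((PySem.Chars.find s sep).toNat + sep.length) s) := by
  induction s with
  | nil =>
    have hni : ¬ sep <:+: ([] : List Char) := by
      intro h
      exact hsep (List.sublist_nil.mp h.sublist)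
    rw [if_pos ((PySem.Chars.find_eq_neg_one_iff _ _).mpr hni), pvSp]
  | cons c rest ih =>
    by_cases hp : sep.isPrefixOf (c :: rest)
    · have hpre : sep <+: (c :: rest) := List.isPrefixOf_iff_prefix.mp hp
      have hf : PySem.Chars.find (c :: rest) sep = ((0 : Nat) : Int) :=
        pvFind_eq_of _ _ 0 (by simpa using hpre) (by omega)
      rw [hf, if_neg (by norm_num)]
      rw [pvSp, dif_pos ⟨hp, hsep⟩]
      simp
    · have hpre : ¬ sep <+: (c :: rest) := fun h => hp (List.isPrefixOf_iff_prefix.mpr h)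
      by_cases hin : sep <:+: rest
      · have h0r : 0 ≤ PySem.Chars.find rest sep := (PySem.Chars.find_nonneg_iff _ _).mpr hin
        obtain ⟨hpj, hminj⟩ := PySem.Chars.find_spec h0r
        have hf : PySem.Chars.find (c :: rest) sep = (((PySem.Chars.find rest sep).toNat + 1 : Nat) : Int) := by
          apply pvFind_eq_of
          · simpa using hpj
          · intro i hi
            cases i with
            | zero => simpa using hpre
            | succ i' =>
              intro hcon
              exact hminj i' (by omega) (by simpa using hcon)
        have hne : PySem.Chars.find rest sep ≠ -1 := by omega
        rw [hf, if_neg (by omega)]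
        rw [pvSp, dif_neg (by tauto)]
        rw [ih, if_neg hne]
        rw [show ((((PySem.Chars.find rest sep).toNat + 1 : Nat)) : Int).toNat
              = (PySem.Chars.find rest sep).toNat + 1 from by omega]
        rw [show (PySem.Chars.find rest sep).toNat + 1 + sep.length
              = ((PySem.Chars.find rest sep).toNat + sep.length) + 1 from by omega]
        simp
      · have hni : ¬ sep <:+: (c :: rest) := by
          intro hinf
          obtain ⟨j, hj⟩ := (PySem.Chars.exists_prefix_drop_iff_isIn sep (c :: rest)).mpr
            ((PySem.Chars.isIn_iff_infix sep (c :: rest)).mpr hinf)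
          cases j with
          | zero => exact hpre (by simpa using hj)
          | succ j' =>
            apply hin
            exact (PySem.Chars.isIn_iff_infix sep rest).mp
              ((PySem.Chars.exists_prefix_drop_iff_isIn sep rest).mp ⟨j', by simpa using hj⟩)
        have hfr : PySem.Chars.find rest sep = -1 := (PySem.Chars.find_eq_neg_one_iff _ _).mpr hin
        rw [if_pos ((PySem.Chars.find_eq_neg_one_iff _ _).mpr hni)]
        rw [pvSp, dif_neg (by tauto)]
        rw [ih, if_pos hfr]

theorem pvScanB_eq (ph : List Char) (hsep : ph ≠ []) (s : List Char) (reps : List (List Char)) :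
    pvScanB ph reps s = (pvSp ph s).headI ++ pvIleave (pvSp ph s).tail reps := by
  induction hn : s.length using Nat.strong_induction_on generalizing s reps with
  | _ n ih =>
  subst hn
  rw [pvScanB]
  dsimp only
  rw [pvSp_find_eq ph hsep s]
  by_cases hf : PySem.Chars.find s ph = -1
  · rw [if_pos hf, if_pos hf]
    simp [pvIleave_nil]
  · rw [if_neg hf, if_neg hf]
    have hinf : ph <:+: s := (PySem.Chars.find_ne_neg_one_iff s ph).mp hf
    have hsne : s ≠ [] := by
      intro h
      subst h
      exact hsep (List.sublist_nil.mp hinf.sublist)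
    have hlt : (List.drop ((PySem.Chars.find s ph).toNat + ph.length) s).length < s.length := by
      have h1 : 0 < ph.length := List.length_pos_of_ne_nil hsep
      have h2 : 0 < s.length := List.length_pos_of_ne_nil hsne
      simp [List.length_drop]
      omega
    rw [dif_pos hlt]
    rcases hq : pvSp ph (List.drop ((PySem.Chars.find s ph).toNat + ph.length) s) with _ | ⟨q0, qt⟩
    · exact absurd hq (pvSp_ne_nil _ _)
    cases reps with
    | nil =>
      dsimp only
      rw [ih _ hlt _ _ rfl, hq]
      simp [pvIleave, pvJoin_nil_cons]
    | cons r rs =>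
      dsimp only
      rw [ih _ hlt _ _ rfl, hq]
      simp [pvIleave]

theorem pvJoinInter (reps ps : List (List Char)) :
    PySem.Chars.join [] (pvInterA ps reps ++ List.drop reps.length ps) = pvIleave ps reps := by
  induction reps generalizing ps with
  | nil => simp [pvInterA, pvIleave]
  | cons r rs ih =>
    cases ps with
    | nil =>
      rw [pvInterA, pvIleave, List.drop_nil, List.append_nil, pvJoin_nil_cons]
      have h := ih []
      rw [List.drop_nil, List.append_nil] at h
      rw [h]
    | cons p pt =>
      rw [pvInterA, pvIleave, List.length_cons, List.drop_succ_cons, List.cons_append,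
          List.cons_append, pvJoin_nil_cons, pvJoin_nil_cons, ih]

theorem pvFoldA (parts : List (List Char)) (reps : List (List Char)) :
    ∀ (k : Nat) (acc : List (List Char)),
      (PySem.List.enumerate reps (k : Int)).foldl
        (fun res p =>
          let res := res ++ [p.2]
          if p.1 + 1 < PySem.List.len parts then res ++ [PySem.List.pyGetD parts (p.1 + 1) []]
          else res)
        acc
      = acc ++ pvInterA (List.drop (k + 1) parts) reps := by
  induction reps with
  | nil =>
    intro k acc
    simp [PySem.List.enumerate_nil, pvInterA]
  | cons r rs ih =>
    intro k acc
    rw [PySem.List.enumerate_cons, List.foldl_cons]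
    have hcast : (k : Int) + 1 = ((k + 1 : Nat) : Int) := by push_cast; ring
    rcases hd : List.drop (k + 1) parts with _ | ⟨p, pt⟩
    · have hge : parts.length ≤ k + 1 := List.drop_eq_nil_iff.mp hd
      have hcond : ¬ ((k : Int) + 1 < PySem.List.len parts) := by
        rw [PySem.List.len_eq]
        omega
      simp only [if_neg hcond]
      rw [hcast, ih (k + 1) (acc ++ [r])]
      have h2 : List.drop (k + 1 + 1) parts = [] := List.drop_eq_nil_iff.mpr (by omega)
      rw [h2, pvInterA]
      simp
    · have hlen : (List.drop (k + 1) parts).length = parts.length - (k + 1) := by simp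
      have hlt : k + 1 < parts.length := by
        rw [hd] at hlen
        simp at hlen
        omega
      have hcond : (k : Int) + 1 < PySem.List.len parts := by
        rw [PySem.List.len_eq]
        omega
      simp only [if_pos hcond]
      have hget : PySem.List.pyGetD parts ((k : Int) + 1) [] = p := by
        rw [hcast, PySem.List.pyGetD_natCast]
        have hidx : parts[k + 1]? = some p := by
          have h3 : (List.drop (k + 1) parts)[0]? = parts[k + 1 + 0]? := List.getElem?_drop
          rw [hd] at h3
          simpa using h3.symm
        simp [List.getD_eq_getElem?_getD, hidx]
      rw [hget, hcast, ih (k + 1) (acc ++ [r] ++ [p])]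
      have h2 : List.drop (k + 1 + 1) parts = pt := by
        have h3 : List.drop 1 (List.drop (k + 1) parts) = pt := by
          rw [hd]
          simp
        rw [List.drop_drop] at h3
        convert h3 using 2
      rw [h2, pvInterA]
      simp

-- ===== VERDICT (by name: the statement is the Claim_ definition above) =====
theorem replace_image_placeholders_spec : Claim_equal_replace_image_placeholders := by
  intro text replacements placeholder hdom hpre
  unfold Spec_replace_image_placeholders
  have hsep : placeholder.toList ≠ [] := by
    intro h
    apply hpre
    have h2 := congrArg String.ofList h
    rw [String.ofList_toList] at h2
    simpa using h2
  unfold replace_image_placeholders replace_image_placeholders_alt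
  by_cases hin : PySem.Chars.isIn placeholder.toList text.toList = false
  · rw [if_pos hin, if_pos hin]
  · rw [if_neg hin, if_neg hin]
    have hsplit : PySem.Chars.split? text.toList placeholder.toList =
        some (PySem.Chars.splitOn text.toList placeholder.toList) := by
      simp [PySem.Chars.split?, List.isEmpty_iff, hsep]
    rw [hsplit]
    dsimp only
    rw [pvSplitOn_eq_pvSp _ _ hsep]
    rcases hps : pvSp placeholder.toList text.toList with _ | ⟨p0, pt⟩
    · exact absurd hps (pvSp_ne_nil _ _)
    rw [pvScanB_eq _ hsep, hps]
    congr 1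
    have hfold := pvFoldA (p0 :: pt) (replacements.map String.toList) 0
      [PySem.List.pyGetD (p0 :: pt) 0 []]
    simp only [Nat.cast_zero] at hfold
    rw [hfold]
    rw [PySem.List.pyGetD_zero_cons]
    simp only [List.drop_succ_cons, List.drop_zero]
    have hslice : PySem.List.slice (p0 :: pt)
        (some (PySem.List.len (replacements.map String.toList) + 1)) none
        = List.drop (replacements.map String.toList).length pt := by
      rw [PySem.List.len_eq, PySem.List.slice_from _ (by positivity)]
      have : ((((replacements.map String.toList).length : Int)) + 1).toNat
          = (replacements.map String.toList).length + 1 := by omega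
      rw [this]
      simp
    split_ifs with hc
    · rw [hslice, List.singleton_append, List.cons_append, pvJoin_nil_cons, pvJoinInter]
      simp
    · have hnil : List.drop (replacements.map String.toList).length pt = [] := by
        apply List.drop_eq_nil_iff.mpr
        rw [PySem.List.len_eq, PySem.List.len_eq] at hc
        simp at hc ⊢
        omega
      rw [List.singleton_append, pvJoin_nil_cons]
      rw [show pvInterA pt (replacements.map String.toList)
            = pvInterA pt (replacements.map String.toList)
              ++ List.drop (replacements.map String.toList).length pt from by
            rw [hnil, List.append_nil]]
      rw [pvJoinInter]
      simp
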